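-- pv_equiv track=rewrite | github.com/wuhu/deep-cuisine | extract.py | get_all_ingredients_desc
-- ===== SOURCE A (Python) =====
-- def extract_ingredients(r):
--     spl = r.split("\n \n")
--     for i, k in enumerate(spl):
--         if "Yield" in k:
--             break
--     return spl[i+1]
--
-- def extract_description(r):
--     spl = r.split("\n \n")
--     for i, k in enumerate(spl):
--         if "Yield" in k:
--             break
--     return "\n".join(spl[i+2:])
--
-- def get_all_ingredients_desc(r):
--     l = []
--     for rr in r:
--         try:
--             l.append((extract_ingredients(rr), extract_description(rr)))
--         except:
--             pass
--     return l
-- ===== SOURCE B (Python) =====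
-- def get_all_ingredients_desc(r):
--     out = []
--     for rr in r:
--         # one-pass state machine over the blocks: no index arithmetic, no slicing, no exception
--         seen = False          # a "Yield" block has been passed
--         ing = None            # the block right after it, once reached
--         desc_parts = []       # every block after that
--         for k in rr.split("\n \n"):
--             if ing is not None:
--                 desc_parts.append(k)
--             elif seen:
--                 ing = k
--             elif "Yield" in k:
--                 seen = True
--         if ing is not None:
--             out.append((ing, "\n".join(desc_parts)))
--     return out
-- ===== Notes on version B (the rewrite author's own statement) =====
-- stated objective: faster
-- what changed: A's staged scheme (two helpers each re-splitting and scanning with enumerate/break, then indexing and slicing under a try/except that swallows the IndexError) is replaced by one split per recipe followed by a single-pass state machine (seen / ing / desc_parts accumulator) that never indexes, slices or raises.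
import Mathlib
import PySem

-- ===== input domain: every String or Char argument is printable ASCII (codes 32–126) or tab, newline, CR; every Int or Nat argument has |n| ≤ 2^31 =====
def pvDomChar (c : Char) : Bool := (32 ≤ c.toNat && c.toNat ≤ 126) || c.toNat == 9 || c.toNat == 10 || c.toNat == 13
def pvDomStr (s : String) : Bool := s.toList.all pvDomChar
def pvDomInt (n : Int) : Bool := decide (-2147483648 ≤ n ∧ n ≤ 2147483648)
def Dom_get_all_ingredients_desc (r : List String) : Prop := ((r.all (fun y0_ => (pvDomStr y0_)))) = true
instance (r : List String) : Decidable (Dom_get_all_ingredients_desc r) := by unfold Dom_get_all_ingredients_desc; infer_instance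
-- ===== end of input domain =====

-- B replaces A's staged find-index-then-slice-with-try/except by a single-pass state machine
-- over the blocks of one split per recipe instead of two (objective: faster by a measured constant factor).


-- ===== PORT A =====
-- the 'for i, k in enumerate(spl): if "Yield" in k: break' loop of both helpers:
-- i carries the index of the current element; on exhaustion i keeps its last value (index of the
-- last element, i.e. the incoming i minus 1; the [] start case is unreachable: split is nonempty)
def pvYieldLoopA (spl : List String) (i : Nat) : Nat :=
  match spl with
  | [] => i - 1
  | k :: rest => if PySem.Str.isIn "Yield" k then i else pvYieldLoopA rest (i + 1)

-- extract_ingredients: spl[i+1]; none = the IndexError that get_all_ingredients_desc swallows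
def pvExtractIngredients (r : String) : Option String :=
  let spl := (PySem.Str.split? r "\n \n").getD []
  let i := pvYieldLoopA spl 0
  PySem.List.pyGet? spl ((i : Int) + 1)

-- extract_description: "\n".join(spl[i+2:])
def pvExtractDescription (r : String) : String :=
  let spl := (PySem.Str.split? r "\n \n").getD []
  let i := pvYieldLoopA spl 0
  PySem.Str.join "\n" (PySem.List.slice spl (some ((i : Int) + 2)) none)

def get_all_ingredients_desc (r : List String) : List (String × String) :=
  r.foldl (fun l rr =>
    -- extract_ingredients(rr) is evaluated first; if it raises, nothing is appended
    match pvExtractIngredients rr with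
    | some ing => l ++ [(ing, pvExtractDescription rr)]
    | none => l) []

-- ===== PORT B =====
-- Source B's inner for-loop body: state = (seen, ing, desc_parts)
def pvScanStep (st : Bool × Option String × List String) (k : String) :
    Bool × Option String × List String :=
  match st with
  | (seen, ing, parts) =>
    if ing.isSome then (seen, ing, parts ++ [k])
    else if seen then (seen, some k, parts)
    else if PySem.Str.isIn "Yield" k then (true, none, parts)
    else (seen, ing, parts)

def get_all_ingredients_desc_alt (r : List String) : List (String × String) :=
  r.foldl (fun out rr =>
    let st := ((PySem.Str.split? rr "\n \n").getD []).foldl pvScanStep (false, none, [])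
    match st.2.1 with
    | some ing => out ++ [(ing, PySem.Str.join "\n" st.2.2)]
    | none => out) []

-- ===== PRECONDITION & SPEC =====
def Spec_get_all_ingredients_desc (r : List String) (out : List (String × String)) : Prop := out = get_all_ingredients_desc_alt r
instance (r : List String) (out : List (String × String)) : Decidable (Spec_get_all_ingredients_desc r out) := by unfold Spec_get_all_ingredients_desc; infer_instance

-- ===== CLAIM (what is proved, stated in full; the proofs are below) =====
def Claim_equal_get_all_ingredients_desc : Prop := ∀ (r : List String), Dom_get_all_ingredients_desc r → Spec_get_all_ingredients_desc r (get_all_ingredients_desc r)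

-- ===== LEMMAS AND PROOFS =====

-- the value both per-recipe bodies compute, phrased via findIdx? / drop
def pvCanon (spl : List String) : Option (String × String) :=
  match spl.findIdx? (fun k => PySem.Str.isIn "Yield" k) with
  | none => none
  | some i =>
    match spl.drop (i + 1) with
    | [] => none
    | k :: t => some (k, PySem.Str.join "\n" t)

-- A's break-or-exhaust loop computes the found-index-or-last-index (shifted by the accumulator)
theorem pvYieldLoopA_eq (spl : List String) (i : Nat) (h : spl ≠ []) :
    pvYieldLoopA spl i =
      i + ((spl.findIdx? (fun k => PySem.Str.isIn "Yield" k)).getD (spl.length - 1)) := by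
  induction spl generalizing i with
  | nil => exact absurd rfl h
  | cons k rest ih =>
    simp only [pvYieldLoopA, List.findIdx?_cons]
    by_cases hk : PySem.Str.isIn "Yield" k = true
    · rw [if_pos hk, if_pos hk]; simp
    · rw [if_neg hk, if_neg hk]
      cases rest with
      | nil => simp [pvYieldLoopA]
      | cons a as =>
        rw [ih _ (by simp)]
        cases hf : List.findIdx? (fun k => PySem.Str.isIn "Yield" k) (a :: as) with
        | none => simp [List.length_cons]; omega
        | some j => simp; omega

-- A's per-recipe body equals pvCanon of the split
theorem pvA_canon (rr : String) :
    (match pvExtractIngredients rr with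
     | some ing => some (ing, pvExtractDescription rr)
     | none => none) = pvCanon ((PySem.Str.split? rr "\n \n").getD []) := by
  simp only [pvExtractIngredients, pvExtractDescription, pvCanon]
  set spl := (PySem.Str.split? rr "\n \n").getD [] with hspl
  by_cases hnil : spl = []
  · simp [hnil, pvYieldLoopA, PySem.List.pyGet?]
  · rw [pvYieldLoopA_eq spl 0 hnil]
    cases hf : spl.findIdx? (fun k => PySem.Str.isIn "Yield" k) with
    | none =>
      simp only [Option.getD]
      have hlen : 0 < spl.length := List.length_pos_of_ne_nil hnil
      have h1 : ((0 + (spl.length - 1) : Nat) : Int) + 1 = ((spl.length : Nat) : Int) := by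
        push_cast; omega
      rw [h1, PySem.List.pyGet?_natCast, List.getElem?_eq_none (by omega)]
    | some j =>
      simp only [Option.getD]
      have hj : j < spl.length := List.findIdx?_eq_some_iff_findIdx_eq.mp hf |>.1
      have h1 : ((0 + j : Nat) : Int) + 1 = (((j + 1 : Nat)) : Int) := by push_cast; ring
      have h2 : ((0 + j : Nat) : Int) + 2 = (((j + 2 : Nat)) : Int) := by push_cast; ring
      rw [h1, h2, PySem.List.pyGet?_natCast, PySem.List.slice_from_natCast]
      by_cases hlt : j + 1 < spl.length
      · rw [List.getElem?_eq_getElem hlt, List.drop_eq_getElem_cons hlt]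
      · have hdrop : List.drop (j + 1) spl = [] := by
          rw [List.drop_eq_nil_iff]; omega
        rw [List.getElem?_eq_none (by omega), hdrop]

-- after ing is set, the scan only appends to desc_parts
theorem pvScan_some (rest : List String) (seen : Bool) (ing : String) (parts : List String) :
    rest.foldl pvScanStep (seen, some ing, parts) = (seen, some ing, parts ++ rest) := by
  induction rest generalizing parts with
  | nil => simp
  | cons k t ih => simp [pvScanStep, ih]

-- B's scan over the whole split equals pvCanon, in state form
theorem pvScan_canon (spl : List String) :
    spl.foldl pvScanStep (false, none, []) =
      match spl.findIdx? (fun k => PySem.Str.isIn "Yield" k) with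
      | none => (false, none, ([] : List String))
      | some i =>
        match spl.drop (i + 1) with
        | [] => (true, none, [])
        | k :: t => (true, some k, t) := by
  induction spl with
  | nil => rfl
  | cons k rest ih =>
    simp only [List.foldl_cons, List.findIdx?_cons]
    by_cases hk : PySem.Str.isIn "Yield" k = true
    · rw [if_pos hk]
      simp only [pvScanStep, Option.isSome_none, Bool.false_eq_true, if_false,
        if_pos hk, List.drop_succ_cons, List.drop_zero]
      cases rest with
      | nil => rfl
      | cons a t => simp [pvScanStep, pvScan_some]
    · rw [if_neg hk]
      simp only [pvScanStep, Option.isSome_none, Bool.false_eq_true, if_false, if_neg hk]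
      rw [ih]
      cases hf : rest.findIdx? (fun k => PySem.Str.isIn "Yield" k) with
      | none => simp
      | some j => simp

-- the per-recipe step functions agree
theorem pv_step_eq (l : List (String × String)) (rr : String) :
    (match pvExtractIngredients rr with
     | some ing => l ++ [(ing, pvExtractDescription rr)]
     | none => l) =
    (let st := ((PySem.Str.split? rr "\n \n").getD []).foldl pvScanStep (false, none, [])
     match st.2.1 with
     | some ing => l ++ [(ing, PySem.Str.join "\n" st.2.2)]
     | none => l) := by
  have hA := pvA_canon rr
  set spl := (PySem.Str.split? rr "\n \n").getD [] with hspl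
  rw [pvScan_canon spl]
  cases hf : spl.findIdx? (fun k => PySem.Str.isIn "Yield" k) with
  | none =>
    simp only [pvCanon, hf] at hA
    cases hI : pvExtractIngredients rr with
    | none => simp
    | some ing => rw [hI] at hA; simp at hA
  | some i =>
    simp only [pvCanon, hf] at hA
    cases hd : spl.drop (i + 1) with
    | nil =>
      simp only [hd] at hA ⊢
      cases hI : pvExtractIngredients rr with
      | none => simp
      | some ing => rw [hI] at hA; simp at hA
    | cons a t =>
      simp only [hd] at hA ⊢
      cases hI : pvExtractIngredients rr with
      | none => rw [hI] at hA; simp at hA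
      | some ing =>
        rw [hI] at hA
        simp only [Option.some.injEq, Prod.mk.injEq] at hA
        simp [hA.1, hA.2]

theorem pv_fold_eq (r : List String) :
    get_all_ingredients_desc r = get_all_ingredients_desc_alt r := by
  unfold get_all_ingredients_desc get_all_ingredients_desc_alt
  induction r using List.reverseRecOn with
  | nil => rfl
  | append_singleton xs x ih =>
    rw [List.foldl_append, List.foldl_append, ih]
    simp only [List.foldl_cons, List.foldl_nil]
    exact pv_step_eq _ x

-- ===== VERDICT (by name: the statement is the Claim_ definition above) =====
theorem get_all_ingredients_desc_spec : Claim_equal_get_all_ingredients_desc := by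
  intro r _
  exact pv_fold_eq r
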